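-- pv_equiv track=rewrite | github.com/4W4I5/chromiumPatchDiff | web/services/analysis.py | _build_release_bug_map
-- ===== SOURCE A (Python) =====
-- def _build_release_bug_map(security_fixes: list[dict[str, str]]) -> dict[str, str]:
--     mapping: dict[str, str] = {}
--     conflicts: set[str] = set()
--
--     for item in security_fixes:
--         if not isinstance(item, dict):
--             continue
--
--         bug_id = str(item.get("bug_id", "") or "").strip()
--         cve_id = str(item.get("cve_id", "") or "").strip().upper()
--         if not bug_id or not cve_id:
--             continue
--
--         existing = mapping.get(bug_id)
--         if existing is None:
--             mapping[bug_id] = cve_id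
--             continue
--
--         if existing != cve_id:
--             conflicts.add(bug_id)
--
--     for bug_id in conflicts:
--         mapping.pop(bug_id, None)
--
--     return mapping
-- ===== SOURCE B (Python) =====
-- def _build_release_bug_map(security_fixes):
--     groups = {}
--     for item in security_fixes:
--         if not isinstance(item, dict):
--             continue
--         bug_id = str(item.get("bug_id", "") or "").strip()
--         cve_id = str(item.get("cve_id", "") or "").strip().upper()
--         if bug_id and cve_id:
--             groups.setdefault(bug_id, set()).add(cve_id)
--     return {b: next(iter(s)) for b, s in groups.items() if len(s) == 1}
-- ===== Notes on version B (the rewrite author's own statement) =====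
-- stated objective: simpler
-- what changed: A interleaves a stored-value map with a separate conflicts set and a final pop pass; B instead groups each bug_id's distinct cve_ids into one dict of sets in a single pass and then keeps exactly the bugs whose set has one element.
import Mathlib
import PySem

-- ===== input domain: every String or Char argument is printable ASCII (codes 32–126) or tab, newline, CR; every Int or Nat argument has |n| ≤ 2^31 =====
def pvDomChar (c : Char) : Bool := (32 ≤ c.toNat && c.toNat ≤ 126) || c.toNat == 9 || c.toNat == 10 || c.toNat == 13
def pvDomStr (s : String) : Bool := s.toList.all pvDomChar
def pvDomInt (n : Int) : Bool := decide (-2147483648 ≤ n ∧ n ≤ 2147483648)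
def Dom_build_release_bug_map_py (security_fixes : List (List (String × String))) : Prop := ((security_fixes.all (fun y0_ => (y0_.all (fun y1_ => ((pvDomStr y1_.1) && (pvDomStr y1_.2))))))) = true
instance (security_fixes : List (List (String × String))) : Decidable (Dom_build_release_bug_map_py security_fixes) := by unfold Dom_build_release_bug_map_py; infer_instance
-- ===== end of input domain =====

-- B replaces A's "stored value + conflicts set + pop" bookkeeping with "group each bug_id's
-- distinct cve_ids, keep the unambiguous ones" (objective: simpler; same guards, same result).

-- ===== PORT A =====
-- one iteration of A's loop: state = (mapping, conflicts)
def pvAStep (st : PySem.Dict String String × PySem.Set String)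
    (item : List (String × String)) : PySem.Dict String String × PySem.Set String :=
  let d := PySem.Dict.ofList item
  let bug_id := PySem.Str.strip (d.getD "bug_id" "")
  let cve_id := PySem.Str.upper (PySem.Str.strip (d.getD "cve_id" ""))
  if bug_id = "" ∨ cve_id = "" then st
  else
    match st.1.get? bug_id with
    | none => (st.1.insert bug_id cve_id, st.2)
    | some existing => if existing ≠ cve_id then (st.1, PySem.Set.add st.2 bug_id) else st

def build_release_bug_map_py (security_fixes : List (List (String × String))) : List (String × String) :=
  let st := security_fixes.foldl pvAStep (PySem.Dict.empty, PySem.Set.empty)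
  -- `for bug_id in conflicts: mapping.pop(bug_id, None)` (erasing a set of keys: result is order-independent)
  (st.2.foldl (fun m b => m.erase b) st.1).items

-- ===== PORT B =====
-- one iteration of B's loop: groups.setdefault(bug_id, set()).add(cve_id)
def pvBStep (groups : PySem.Dict String (PySem.Set String))
    (item : List (String × String)) : PySem.Dict String (PySem.Set String) :=
  let d := PySem.Dict.ofList item
  let bug_id := PySem.Str.strip (d.getD "bug_id" "")
  let cve_id := PySem.Str.upper (PySem.Str.strip (d.getD "cve_id" ""))
  if bug_id ≠ "" ∧ cve_id ≠ "" then
    PySem.Dict.modify groups bug_id PySem.Set.empty (fun s => PySem.Set.add s cve_id)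
  else groups

def build_release_bug_map_py_alt (security_fixes : List (List (String × String))) : List (String × String) :=
  (security_fixes.foldl pvBStep PySem.Dict.empty).items.filterMap (fun p =>
    -- {b: next(iter(s)) for b, s in groups.items() if len(s) == 1}
    match p.2 with
    | [x] => some (p.1, x)
    | _ => none)

-- ===== PRECONDITION & SPEC =====
def Spec_build_release_bug_map_py (security_fixes : List (List (String × String))) (out : List (String × String)) : Prop := out = build_release_bug_map_py_alt security_fixes
instance (security_fixes : List (List (String × String))) (out : List (String × String)) : Decidable (Spec_build_release_bug_map_py security_fixes out) := by unfold Spec_build_release_bug_map_py; infer_instance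

-- ===== CLAIM (what is proved, stated in full; the proofs are below) =====
def Claim_equal_build_release_bug_map_py : Prop := ∀ (security_fixes : List (List (String × String))), Dom_build_release_bug_map_py security_fixes → Spec_build_release_bug_map_py security_fixes (build_release_bug_map_py security_fixes)

-- ===== LEMMAS AND PROOFS =====

-- the (bug_id, cve_id) pair an item contributes, if it passes the guards
def pvPair (item : List (String × String)) : Option (String × String) :=
  let d := PySem.Dict.ofList item
  let bug_id := PySem.Str.strip (d.getD "bug_id" "")
  let cve_id := PySem.Str.upper (PySem.Str.strip (d.getD "cve_id" ""))
  if bug_id = "" ∨ cve_id = "" then none else some (bug_id, cve_id)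

-- A's loop body on a valid pair
def pvACore (st : PySem.Dict String String × PySem.Set String) (p : String × String) :
    PySem.Dict String String × PySem.Set String :=
  match st.1.get? p.1 with
  | none => (st.1.insert p.1 p.2, st.2)
  | some existing => if existing ≠ p.2 then (st.1, PySem.Set.add st.2 p.1) else st

-- B's loop body on a valid pair
def pvBCore (g : PySem.Dict String (PySem.Set String)) (p : String × String) :
    PySem.Dict String (PySem.Set String) :=
  PySem.Dict.modify g p.1 PySem.Set.empty (fun s => PySem.Set.add s p.2)

lemma pvAStep_core (st : PySem.Dict String String × PySem.Set String) (item : List (String × String)) :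
    pvAStep st item = (pvPair item).elim st (pvACore st) := by
  by_cases hcond : (PySem.Str.strip ((PySem.Dict.ofList item).getD "bug_id" "") = "" ∨
      PySem.Str.upper (PySem.Str.strip ((PySem.Dict.ofList item).getD "cve_id" "")) = "")
  · simp only [pvAStep, pvPair, if_pos hcond]; rfl
  · simp only [pvAStep, pvPair, if_neg hcond]; rfl

lemma pvBStep_core (g : PySem.Dict String (PySem.Set String)) (item : List (String × String)) :
    pvBStep g item = (pvPair item).elim g (pvBCore g) := by
  by_cases hcond : (PySem.Str.strip ((PySem.Dict.ofList item).getD "bug_id" "") = "" ∨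
      PySem.Str.upper (PySem.Str.strip ((PySem.Dict.ofList item).getD "cve_id" "")) = "")
  · have hneg : ¬ (PySem.Str.strip ((PySem.Dict.ofList item).getD "bug_id" "") ≠ "" ∧
        PySem.Str.upper (PySem.Str.strip ((PySem.Dict.ofList item).getD "cve_id" "")) ≠ "") :=
      fun hp => hcond.elim hp.1 hp.2
    simp only [pvBStep, pvPair, if_pos hcond, if_neg hneg]; rfl
  · have hpos : PySem.Str.strip ((PySem.Dict.ofList item).getD "bug_id" "") ≠ "" ∧
        PySem.Str.upper (PySem.Str.strip ((PySem.Dict.ofList item).getD "cve_id" "")) ≠ "" := by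
      exact ⟨fun ha => hcond (Or.inl ha), fun hc => hcond (Or.inr hc)⟩
    simp only [pvBStep, pvPair, if_neg hcond, if_pos hpos]; rfl

lemma foldl_elim_pair {σ : Type} (f : σ → List (String × String) → σ)
    (g : σ → String × String → σ)
    (hf : ∀ st item, f st item = (pvPair item).elim st (g st)) :
    ∀ (l : List (List (String × String))) (st : σ),
      l.foldl f st = (l.filterMap pvPair).foldl g st := by
  intro l
  induction l with
  | nil => intro st; rfl
  | cons a l ih =>
      intro st
      simp only [List.foldl_cons, List.filterMap_cons, hf]
      cases h : pvPair a <;> simp [ih]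

-- the invariant tying A's (mapping, conflicts) to B's groups
def pvInv (G : PySem.Dict String (PySem.Set String))
    (M : PySem.Dict String String) (C : PySem.Set String) : Prop :=
  M.items = G.items.map (fun p => (p.1, p.2.headI)) ∧
  (∀ p ∈ G.items, p.2 ≠ []) ∧
  G.keys.Nodup ∧
  (∀ k, C.contains k = decide (2 ≤ (G.getD k []).length))

lemma pvFind?_map_fst (l : List (String × PySem.Set String)) (k : String) :
    (l.map (fun p => (p.1, p.2.headI))).find? (fun p => p.1 == k)
      = (l.find? (fun p => p.1 == k)).map (fun p => (p.1, p.2.headI)) := by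
  induction l with
  | nil => rfl
  | cons a l ih =>
      simp only [List.map_cons, List.find?_cons]
      by_cases h : (a.1 == k) = true <;> simp [h, ih]

lemma pvInv_get? (G : PySem.Dict String (PySem.Set String))
    (M : PySem.Dict String String) (C : PySem.Set String) (h : pvInv G M C) (k : String) :
    M.get? k = (G.get? k).map (fun s => s.headI) := by
  obtain ⟨h1, -, -, -⟩ := h
  simp only [PySem.Dict.get?, h1, pvFind?_map_fst]
  cases G.items.find? (fun p => p.1 == k) <;> rfl

lemma pvHeadI_mem (s : List String) (h : s ≠ []) : s.headI ∈ s := by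
  cases s with
  | nil => exact absurd rfl h
  | cons a t => exact List.mem_cons_self ..

lemma pvAdd_headI (s : PySem.Set String) (x : String) (h : s ≠ []) :
    (PySem.Set.add s x).headI = s.headI := by
  simp only [PySem.Set.add]
  split
  · rfl
  · cases s with
    | nil => exact absurd rfl h
    | cons a t => rfl

lemma pvAdd_ne_nil (s : PySem.Set String) (x : String) :
    PySem.Set.add s x ≠ [] := by
  simp only [PySem.Set.add]
  split
  · intro hs; simp_all [PySem.Set.contains]
  · simp

lemma pvSet_contains_add_of_ne (s : PySem.Set String) (x k : String) (h : k ≠ x) :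
    (PySem.Set.add s x).contains k = s.contains k := by
  have hmem : (k ∈ PySem.Set.add s x) ↔ k ∈ s := by
    rw [PySem.Set.mem_add]; simp [h]
  simp only [PySem.Set.contains]
  rw [Bool.eq_iff_iff]
  simp only [List.contains_iff_mem]
  exact hmem

lemma pvTwoLe (s : List String) (x y : String) (hx : x ∈ s) (hy : y ∈ s) (hne : x ≠ y) :
    2 ≤ s.length := by
  match s with
  | [] => cases hx
  | [a] =>
      simp only [List.mem_singleton] at hx hy
      exact absurd (hx.trans hy.symm) hne
  | a :: b :: t => simp only [List.length_cons]; omega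

lemma pvInv_step (G : PySem.Dict String (PySem.Set String))
    (M : PySem.Dict String String) (C : PySem.Set String) (p : String × String)
    (h : pvInv G M C) :
    pvInv (pvBCore G p) (pvACore (M, C) p).1 (pvACore (M, C) p).2 := by
  obtain ⟨b, c⟩ := p
  have hget := pvInv_get? G M C h b
  obtain ⟨h1, h2, h3, h4⟩ := h
  cases hG : G.get? b with
  | none =>
      rw [hG, Option.map_none] at hget
      have hGc : G.contains b = false := by rw [PySem.Dict.contains_eq_isSome_get?, hG]; rfl
      have hMc : M.contains b = false := by rw [PySem.Dict.contains_eq_isSome_get?, hget]; rfl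
      have hbk : b ∉ G.keys := by
        intro hmem
        simp only [PySem.Dict.contains, List.any_eq_false] at hGc
        obtain ⟨q, hq, hqb⟩ := List.mem_map.mp hmem
        exact absurd hqb (by simpa using hGc q hq)
      have hGD : PySem.Dict.getD G b PySem.Set.empty = [] := by
        simp [PySem.Dict.getD, hG]
      have hac : PySem.Set.add ([] : PySem.Set String) c = [c] := rfl
      simp only [pvACore, pvBCore, PySem.Dict.modify, hget, hGD, hac]
      refine ⟨?_, ?_, ?_, ?_⟩
      · simp [PySem.Dict.insert, hGc, hMc, h1]
      · intro q hq
        simp only [PySem.Dict.insert, hGc, Bool.false_eq_true,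
          List.mem_append, List.mem_singleton, reduceIte] at hq
        rcases hq with hq | hq
        · exact h2 q hq
        · subst hq; simp
      · simp only [PySem.Dict.keys, PySem.Dict.insert, hGc, Bool.false_eq_true, reduceIte,
          List.map_append, List.map_cons, List.map_nil]
        rw [List.nodup_append]
        refine ⟨h3, List.nodup_singleton b, ?_⟩
        intro a ha b1 hb1
        rw [List.mem_singleton] at hb1
        subst hb1
        exact fun hab => hbk (hab ▸ ha)
      · intro k
        by_cases hk : k = b
        · subst hk
          rw [PySem.Dict.getD_insert_self, h4 k]
          have : PySem.Dict.getD G k [] = [] := hGD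
          rw [this]
          rfl
        · rw [PySem.Dict.getD_insert_of_ne _ _ _ hk, h4 k]
  | some s =>
      rw [hG, Option.map_some] at hget
      have hGc : G.contains b = true := by rw [PySem.Dict.contains_eq_isSome_get?, hG]; rfl
      obtain ⟨q, hfind, hq2⟩ : ∃ q, G.items.find? (fun p => p.1 == b) = some q ∧ q.2 = s := by
        simp only [PySem.Dict.get?] at hG
        cases hf : G.items.find? (fun p => p.1 == b) <;> rw [hf] at hG <;> simp_all
      have hqmem := List.mem_of_find?_eq_some hfind
      have hqb : q.1 = b := by simpa using List.find?_some hfind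
      have hsne : s ≠ [] := hq2 ▸ h2 q hqmem
      have hGD : PySem.Dict.getD G b PySem.Set.empty = s := by simp [PySem.Dict.getD, hG]
      have hval : ∀ r ∈ G.items, r.1 = b → r.2 = s := by
        intro r hr hrb
        rw [PySem.Dict.items_eq_map_keys G h3 (PySem.Set.empty : PySem.Set String)] at hr
        obtain ⟨k, hk, hkeq⟩ := List.mem_map.mp hr
        cases hkeq
        simp only at hrb ⊢
        rw [hrb]
        exact hGD
      have haddne := pvAdd_ne_nil s c
      have haddhead := pvAdd_headI s c hsne
      have hitems : ∀ t : PySem.Set String, t.headI = s.headI →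
          M.items = (G.insert b t).items.map (fun r => (r.1, r.2.headI)) := by
        intro t ht
        rw [h1]
        simp only [PySem.Dict.insert, hGc, reduceIte, List.map_map]
        apply List.map_congr_left
        intro r hr
        by_cases hrb : (r.1 == b) = true
        · have hrb' : r.1 = b := by simpa using hrb
          simp [Function.comp, ht, hval r hr hrb', hrb']
        · simp [Function.comp, hrb]
      have hne2 : ∀ r ∈ (G.insert b (PySem.Set.add s c)).items, r.2 ≠ [] := by
        intro r hr
        simp only [PySem.Dict.insert, hGc, reduceIte, List.mem_map] at hr
        obtain ⟨r', hr', hreq⟩ := hr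
        by_cases hrb : (r'.1 == b) = true
        · rw [if_pos hrb] at hreq; cases hreq; exact haddne
        · rw [if_neg hrb] at hreq; exact hreq ▸ h2 r' hr'
      have hkeys : (G.insert b (PySem.Set.add s c)).keys = G.keys := by
        simp only [PySem.Dict.keys, PySem.Dict.insert, hGc, reduceIte, List.map_map]
        apply List.map_congr_left
        intro r hr
        by_cases hrb : (r.1 == b) = true
        · simp [Function.comp, (by simpa using hrb : r.1 = b)]
        · simp [Function.comp, hrb]
      have hGD' : ∀ k, (G.insert b (PySem.Set.add s c)).getD k []
          = if k = b then PySem.Set.add s c else G.getD k [] := by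
        intro k
        by_cases hk : k = b
        · subst hk; simp [PySem.Dict.getD_insert_self]
        · simp [PySem.Dict.getD_insert_of_ne _ _ _ hk, hk]
      simp only [pvACore, pvBCore, PySem.Dict.modify, hget, hGD]
      by_cases hhc : s.headI = c
      · -- existing == cve_id: A leaves the state alone, and c is already in the set
        have hcs : c ∈ s := hhc ▸ pvHeadI_mem s hsne
        have hadd : PySem.Set.add s c = s := by
          simp [PySem.Set.add, PySem.Set.contains, hcs]
        simp only [hhc, ne_eq, not_true_eq_false, reduceIte]
        refine ⟨hitems _ haddhead, hne2, hkeys ▸ h3, ?_⟩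
        intro k
        rw [h4 k, hGD' k]
        by_cases hk : k = b
        · subst hk
          rw [if_pos rfl, hadd]
          have hGDnil : G.getD k [] = s := hGD
          rw [hGDnil]
        · rw [if_neg hk]
      · -- a conflicting cve_id: A records the conflict
        simp only [ne_eq, hhc, not_false_eq_true, reduceIte]
        refine ⟨hitems _ haddhead, hne2, hkeys ▸ h3, ?_⟩
        intro k
        rw [hGD' k]
        by_cases hk : k = b
        · subst hk
          rw [if_pos rfl]
          have hbmem : k ∈ PySem.Set.add C k := (PySem.Set.mem_add C k k).mpr (Or.inr rfl)
          have hctrue : (PySem.Set.add C k).contains k = true := by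
            simp [PySem.Set.contains, hbmem]
          rw [hctrue]
          by_cases hcs : c ∈ s
          · have hadd : PySem.Set.add s c = s := by
              simp [PySem.Set.add, PySem.Set.contains, hcs]
            rw [hadd]
            exact (decide_eq_true (pvTwoLe s s.headI c (pvHeadI_mem s hsne) hcs hhc)).symm
          · have hadd : PySem.Set.add s c = s ++ [c] := by
              have : s.contains c = false := by
                simpa [PySem.Set.contains, List.contains_iff_mem] using hcs
              simp [PySem.Set.add, PySem.Set.contains, hcs]
            rw [hadd]
            have : 2 ≤ (s ++ [c]).length := by
              have := List.length_pos_iff.mpr hsne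
              simp only [List.length_append, List.length_singleton]
              omega
            exact (decide_eq_true this).symm
        · rw [if_neg hk, pvSet_contains_add_of_ne C b k hk, h4 k]

lemma pvInv_foldl (ps : List (String × String)) :
    ∀ (G : PySem.Dict String (PySem.Set String)) (M : PySem.Dict String String)
      (C : PySem.Set String), pvInv G M C →
      pvInv (ps.foldl pvBCore G) (ps.foldl pvACore (M, C)).1 (ps.foldl pvACore (M, C)).2 := by
  induction ps with
  | nil => intro G M C h; exact h
  | cons p ps ih =>
      intro G M C h
      simp only [List.foldl_cons]
      have := pvInv_step G M C p h
      have heq : pvACore (M, C) p = ((pvACore (M, C) p).1, (pvACore (M, C) p).2) := rfl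
      rw [heq]
      exact ih _ _ _ this

lemma foldl_erase_items (C : List String) :
    ∀ (M : PySem.Dict String String),
      (C.foldl (fun m b => m.erase b) M).items
        = M.items.filter (fun p => !(C.contains p.1)) := by
  induction C with
  | nil => intro M; simp
  | cons c C ih =>
      intro M
      rw [List.foldl_cons, ih]
      show List.filter _ (M.erase c).items = _
      simp only [PySem.Dict.erase]
      rw [List.filter_filter]
      apply List.filter_congr
      intro p _
      simp only [List.contains_cons]
      cases h : (p.1 == c) <;> cases hc : (C.contains p.1) <;> simp [h, hc, BEq.comm]

lemma pvFilterMap_final (C : PySem.Set String) (l : List (String × PySem.Set String))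
    (h : ∀ p ∈ l, p.2 ≠ [] ∧ C.contains p.1 = decide (2 ≤ p.2.length)) :
    (l.map (fun p => (p.1, p.2.headI))).filter (fun p => !(C.contains p.1))
      = l.filterMap (fun p => match p.2 with | [x] => some (p.1, x) | _ => none) := by
  induction l with
  | nil => rfl
  | cons q l ih =>
      obtain ⟨hq1, hq2⟩ := h q (List.mem_cons_self ..)
      have ihh := ih (fun p hp => h p (List.mem_cons_of_mem _ hp))
      match hs : q.2 with
      | [] => exact absurd hs hq1
      | [x] =>
          rw [hs] at hq2
          simp only [List.map_cons, List.filterMap_cons, List.filter_cons, hs, hq2]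
          simpa using congrArg (List.cons (q.1, x)) ihh
      | x :: y :: t =>
          rw [hs] at hq2
          simp only [List.map_cons, List.filterMap_cons, List.filter_cons, hs, hq2]
          simpa using ihh

lemma pvInv_final (G : PySem.Dict String (PySem.Set String))
    (M : PySem.Dict String String) (C : PySem.Set String) (h : pvInv G M C) :
    (C.foldl (fun m b => m.erase b) M).items
      = G.items.filterMap (fun p => match p.2 with | [x] => some (p.1, x) | _ => none) := by
  obtain ⟨h1, h2, h3, h4⟩ := h
  have hmem : ∀ p ∈ G.items, PySem.Dict.getD G p.1 [] = p.2 := by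
    intro p hp
    have := PySem.Dict.items_eq_map_keys G h3 ([] : PySem.Set String)
    rw [this] at hp
    obtain ⟨k, hk, hkeq⟩ := List.mem_map.mp hp
    cases hkeq; rfl
  rw [foldl_erase_items, h1]
  exact pvFilterMap_final C G.items (fun p hp => ⟨h2 p hp, by rw [h4 p.1, hmem p hp]⟩)

-- ===== VERDICT (by name: the statement is the Claim_ definition above) =====
theorem build_release_bug_map_py_spec : Claim_equal_build_release_bug_map_py := by
  intro sf _
  unfold Spec_build_release_bug_map_py build_release_bug_map_py build_release_bug_map_py_alt
  rw [foldl_elim_pair pvAStep pvACore pvAStep_core, foldl_elim_pair pvBStep pvBCore pvBStep_core]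
  have hinv : pvInv PySem.Dict.empty PySem.Dict.empty PySem.Set.empty := by
    refine ⟨rfl, by simp [PySem.Dict.empty], by simp [PySem.Dict.empty, PySem.Dict.keys], ?_⟩
    intro k; rfl
  have := pvInv_foldl (sf.filterMap pvPair) PySem.Dict.empty PySem.Dict.empty PySem.Set.empty hinv
  exact pvInv_final _ _ _ this
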